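-- pv_equiv track=rewrite | github.com/wesvh/poc_agent_meet | src/etl/transform.py | normalize_schedule_days
-- ===== SOURCE A (Python) =====
-- import unicodedata
--
-- def _strip_accents(text: str) -> str:
--     nfkd = unicodedata.normalize("NFKD", text)
--     return "".join(c for c in nfkd if not unicodedata.combining(c))
--
-- _DAY_ORDER = ["lunes", "martes", "miercoles", "jueves", "viernes", "sabado", "domingo"]
--
-- def normalize_schedule_days(raw: str) -> list[str]:
--     if not raw:
--         return []
--     seen: set[str] = set()
--     result: list[str] = []
--     for part in raw.split(";"):
--         canonical = _strip_accents(part.strip().lower())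
--         if canonical in _DAY_ORDER and canonical not in seen:
--             seen.add(canonical)
--             result.append(canonical)
--     return sorted(result, key=lambda d: _DAY_ORDER.index(d))
-- ===== SOURCE B (Python) =====
-- import unicodedata
--
-- _DAY_ORDER = ["lunes", "martes", "miercoles", "jueves", "viernes", "sabado", "domingo"]
--
-- def _canonical(token: str) -> str:
--     nfkd = unicodedata.normalize("NFKD", token.strip().lower())
--     return "".join(c for c in nfkd if not unicodedata.combining(c))
--
-- def normalize_schedule_days(raw: str) -> list[str]:
--     # single character-level scan: build each ';'-delimited token in buf,
--     # record recognized days in a fixed boolean flag array, emit via zip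
--     found = [False] * len(_DAY_ORDER)
--     buf: list[str] = []
--
--     def _close() -> None:
--         day = _canonical("".join(buf))
--         buf.clear()
--         for i, name in enumerate(_DAY_ORDER):
--             if name == day:
--                 found[i] = True
--
--     for ch in raw:
--         if ch == ";":
--             _close()
--         else:
--             buf.append(ch)
--     _close()
--     return [name for name, ok in zip(_DAY_ORDER, found) if ok]
-- ===== Notes on version B (the rewrite author's own statement) =====
-- stated objective: alternative
-- what changed: B replaces A's split(';')/seen-set/append-in-appearance-order/sorted(key=_DAY_ORDER.index) pipeline with a single character-level scan that assembles each ';'-delimited token in a buffer and marks a fixed boolean flag array indexed by _DAY_ORDER, emitting the result by zipping _DAY_ORDER with the flags; no split, no set, no sort.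
import Mathlib
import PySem

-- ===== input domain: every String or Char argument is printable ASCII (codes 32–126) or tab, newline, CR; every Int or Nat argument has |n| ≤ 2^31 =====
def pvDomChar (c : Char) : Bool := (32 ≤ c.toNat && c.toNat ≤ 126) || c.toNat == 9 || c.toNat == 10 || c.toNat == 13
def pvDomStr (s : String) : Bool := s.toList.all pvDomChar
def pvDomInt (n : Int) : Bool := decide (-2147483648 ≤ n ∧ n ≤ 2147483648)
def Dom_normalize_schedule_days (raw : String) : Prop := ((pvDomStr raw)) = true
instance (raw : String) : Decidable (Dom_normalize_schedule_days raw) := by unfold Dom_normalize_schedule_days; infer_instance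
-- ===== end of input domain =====

-- B replaces A's split/seen-set/append/sorted(key=_DAY_ORDER.index) pipeline by one character-level
-- scan that builds each ';'-delimited token and marks a fixed boolean flag array, emitted via zip
-- (objective: alternative decomposition); same return value on the domain.

-- ===== PORT A =====
-- _strip_accents: on the printable-ASCII domain NFKD is the identity and no combining
-- characters occur, so the helper is exact as the identity there.
def pvStripAccents (s : String) : String := s

def pvDayOrder : List String := ["lunes", "martes", "miercoles", "jueves", "viernes", "sabado", "domingo"]

-- `_strip_accents(part.strip().lower())`, the canonical form both Pythons compute per token
def pvCanon (part : String) : String := pvStripAccents (PySem.Str.lower (PySem.Str.strip part))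

def normalize_schedule_days (raw : String) : List String :=
  if raw = "" then []                                    -- `if not raw: return []`
  else
    -- `raw.split(";")`: sep ";" is nonempty, so split? is always `some`
    let parts := (PySem.Str.split? raw ";").getD []
    let st := parts.foldl (fun (st : PySem.Set String × List String) part =>
        if pvCanon part ∈ pvDayOrder ∧ pvCanon part ∉ st.1 then
          (PySem.Set.add st.1 (pvCanon part), st.2 ++ [pvCanon part])
        else st) (PySem.Set.empty, [])
    -- key=lambda d: _DAY_ORDER.index(d); every element of result is in _DAY_ORDER, so index never raises
    PySem.List.sorted st.2 (fun d => (PySem.List.index? pvDayOrder d).getD 0)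

-- ===== PORT B =====
-- `_close()`: canonicalize the buffered token, set found[i] for every matching day, clear buf
def pvMarkDay (found : List Bool) (buf : List Char) : List Bool :=
  (pvDayOrder.zip found).map (fun p => p.2 || (p.1 == pvCanon (String.ofList buf)))

def normalize_schedule_days_alt (raw : String) : List String :=
  let st := raw.toList.foldl
      (fun (st : List Bool × List Char) ch =>
        if ch = ';' then (pvMarkDay st.1 st.2, []) else (st.1, st.2 ++ [ch]))
      (List.replicate 7 false, [])
  let found := pvMarkDay st.1 st.2                       -- final `_close()` after the loop
  ((pvDayOrder.zip found).filter (fun p => p.2)).map (fun p => p.1)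

-- ===== PRECONDITION & SPEC =====
def Spec_normalize_schedule_days (raw : String) (out : List String) : Prop := out = normalize_schedule_days_alt raw
instance (raw : String) (out : List String) : Decidable (Spec_normalize_schedule_days raw out) := by unfold Spec_normalize_schedule_days; infer_instance

-- ===== CLAIM (what is proved, stated in full; the proofs are below) =====
def Claim_equal_normalize_schedule_days : Prop := ∀ (raw : String), Dom_normalize_schedule_days raw → Spec_normalize_schedule_days raw (normalize_schedule_days raw)

-- ===== LEMMAS AND PROOFS =====

-- Proof-side view of splitting on ';': `pvSplitSem pre l` is the list of ';'-separated chunks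
-- of `pre ++ l` where `pre` contains no ';'.
def pvSplitSem (pre : List Char) : List Char → List (List Char)
  | [] => [pre]
  | c :: cs => if c = ';' then pre :: pvSplitSem [] cs else pvSplitSem (pre ++ [c]) cs

theorem pv_go_spec (fuel : Nat) : ∀ (l cur : List Char) (acc : List (List Char)),
    l.length < fuel →
    PySem.Chars.splitOn.go [';'] fuel l cur acc = acc.reverse ++ pvSplitSem cur.reverse l := by
  induction fuel with
  | zero => intro l cur acc h; omega
  | succ n ih =>
    intro l cur acc h
    cases l with
    | nil => simp [PySem.Chars.splitOn.go, pvSplitSem]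
    | cons c rest =>
      by_cases hc : c = ';'
      · subst hc
        have : PySem.Chars.splitOn.go [';'] (n+1) (';' :: rest) cur acc
            = PySem.Chars.splitOn.go [';'] n rest [] (cur.reverse :: acc) := by
          simp [PySem.Chars.splitOn.go, List.isPrefixOf]
        rw [this, ih rest [] (cur.reverse :: acc) (by simpa using Nat.lt_of_succ_lt_succ h)]
        simp [pvSplitSem]
      · have : PySem.Chars.splitOn.go [';'] (n+1) (c :: rest) cur acc
            = PySem.Chars.splitOn.go [';'] n rest (c :: cur) acc := by
          simp [PySem.Chars.splitOn.go, List.isPrefixOf, Ne.symm hc]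
        rw [this, ih rest (c :: cur) acc (by simpa using Nat.lt_of_succ_lt_succ h)]
        simp [pvSplitSem, hc]

theorem pv_split_eq (raw : String) :
    (PySem.Str.split? raw ";").getD []
      = (pvSplitSem [] raw.toList).map String.ofList := by
  have h : PySem.Chars.split? raw.toList [';'] = some (pvSplitSem [] raw.toList) := by
    simp only [PySem.Chars.split?, PySem.Chars.splitOn, List.isEmpty_cons, Bool.false_eq_true,
      if_false, Option.some.injEq]
    simpa using pv_go_spec (raw.toList.length + 1) raw.toList [] [] (Nat.lt_succ_self _)
  simp [PySem.Str.split?, show (";" : String).toList = [';'] from rfl, h]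

-- B's character scan over cs, closed at the end, marks exactly the chunks of `pvSplitSem buf cs`.
theorem pv_scan : ∀ (cs : List Char) (found : List Bool) (buf : List Char),
    pvMarkDay (cs.foldl
        (fun (st : List Bool × List Char) ch =>
          if ch = ';' then (pvMarkDay st.1 st.2, []) else (st.1, st.2 ++ [ch]))
        (found, buf)).1
      (cs.foldl
        (fun (st : List Bool × List Char) ch =>
          if ch = ';' then (pvMarkDay st.1 st.2, []) else (st.1, st.2 ++ [ch]))
        (found, buf)).2
    = (pvSplitSem buf cs).foldl pvMarkDay found := by
  intro cs
  induction cs with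
  | nil => intro found buf; simp [pvSplitSem]
  | cons c cs ih =>
    intro found buf
    by_cases hc : c = ';'
    · subst hc
      simp only [List.foldl_cons, pvSplitSem, reduceIte]
      rw [ih (pvMarkDay found buf) []]
    · simp only [List.foldl_cons, if_neg hc, pvSplitSem]
      rw [ih found (buf ++ [c])]

theorem pv_mark_length (found : List Bool) (buf : List Char) (h : found.length = 7) :
    (pvMarkDay found buf).length = 7 := by
  simp [pvMarkDay, h, pvDayOrder]

theorem pv_mark_get (found : List Bool) (buf : List Char) (h : found.length = 7)
    (i : Nat) (hi : i < 7) :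
    (pvMarkDay found buf)[i]'(by rw [pv_mark_length found buf h]; exact hi)
      = (found[i]'(by omega) || (pvDayOrder[i]'(by simp [pvDayOrder]; omega) == pvCanon (String.ofList buf))) := by
  simp [pvMarkDay]

theorem pv_found_length : ∀ (parts : List (List Char)) (found : List Bool),
    found.length = 7 → (parts.foldl pvMarkDay found).length = 7 := by
  intro parts
  induction parts with
  | nil => intro found h; exact h
  | cons p ps ih => intro found h; exact ih _ (pv_mark_length found p h)

theorem pv_found_get : ∀ (parts : List (List Char)) (found : List Bool)
    (h : found.length = 7) (i : Nat) (hi : i < 7),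
    (parts.foldl pvMarkDay found)[i]'(by rw [pv_found_length parts found h]; exact hi)
      = (found[i]'(by omega)
          || parts.any (fun q => pvDayOrder[i]'(by simp [pvDayOrder]; omega) == pvCanon (String.ofList q))) := by
  intro parts
  induction parts with
  | nil => intro found h i hi; simp
  | cons p ps ih =>
    intro found h i hi
    simp only [List.foldl_cons, List.any_cons]
    rw [ih (pvMarkDay found p) (pv_mark_length found p h) i hi,
        pv_mark_get found p h i hi]
    cases found[i]'(by omega) <;> simp

-- filtering a list zipped with the pointwise image of a predicate is just filtering by it
theorem pv_zip_map_filter {α : Type} (l : List α) (P : α → Bool) :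
    ((l.zip (l.map P)).filter (fun p => p.2)).map (fun p => p.1) = l.filter P := by
  induction l with
  | nil => rfl
  | cons a l ih =>
    by_cases h : P a <;> simp [h, ih]

-- A's loop keeps seen = result (as lists): both start empty and are extended together.
theorem pv_foldA_diag (f : String → String) (parts : List String) (s : List String) :
    parts.foldl (fun (st : PySem.Set String × List String) part =>
        if f part ∈ pvDayOrder ∧ f part ∉ st.1 then
          (PySem.Set.add st.1 (f part), st.2 ++ [f part])
        else st) (s, s)
    = (parts.foldl (fun acc part => if f part ∈ pvDayOrder ∧ f part ∉ acc then acc ++ [f part] else acc) s,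
       parts.foldl (fun acc part => if f part ∈ pvDayOrder ∧ f part ∉ acc then acc ++ [f part] else acc) s) := by
  induction parts generalizing s with
  | nil => rfl
  | cons p ps ih =>
    simp only [List.foldl_cons]
    by_cases h : f p ∈ pvDayOrder ∧ f p ∉ s
    · rw [if_pos h, if_pos h, PySem.Set.add_of_not_mem h.2]
      exact ih (s ++ [f p])
    · rw [if_neg h, if_neg h]
      exact ih s

theorem pv_mem_foldA (f : String → String) (parts : List String) (s : List String) (d : String) :
    (d ∈ parts.foldl (fun acc part => if f part ∈ pvDayOrder ∧ f part ∉ acc then acc ++ [f part] else acc) s)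
    ↔ d ∈ s ∨ (d ∈ pvDayOrder ∧ ∃ p ∈ parts, f p = d) := by
  induction parts generalizing s with
  | nil => simp
  | cons p ps ih =>
    simp only [List.foldl_cons]
    by_cases h : f p ∈ pvDayOrder ∧ f p ∉ s
    · rw [if_pos h, ih]
      simp only [List.mem_append, List.mem_cons]
      aesop
    · rw [if_neg h, ih]
      have h' : f p ∈ pvDayOrder → f p ∈ s := fun h1 => not_not.mp (fun h2 => h ⟨h1, h2⟩)
      simp only [List.mem_cons]
      aesop

theorem pv_nodup_foldA (f : String → String) (parts : List String) (s : List String) (hs : s.Nodup) :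
    (parts.foldl (fun acc part => if f part ∈ pvDayOrder ∧ f part ∉ acc then acc ++ [f part] else acc) s).Nodup := by
  induction parts generalizing s with
  | nil => exact hs
  | cons p ps ih =>
    simp only [List.foldl_cons]
    by_cases h : f p ∈ pvDayOrder ∧ f p ∉ s
    · rw [if_pos h]
      refine ih _ (List.Nodup.append hs (List.nodup_singleton _) ?_)
      intro a ha hb
      rw [List.mem_singleton] at hb
      exact h.2 (hb ▸ ha)
    · rw [if_neg h]
      exact ih _ hs

-- _DAY_ORDER is strictly increasing under its own index key, and duplicate-free.
theorem pv_dayOrder_pairwise :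
    pvDayOrder.Pairwise (fun a b =>
      (PySem.List.index? pvDayOrder a).getD 0 < (PySem.List.index? pvDayOrder b).getD 0) := by
  decide

theorem pv_dayOrder_nodup : pvDayOrder.Nodup := by decide

-- A, on nonempty raw, equals _DAY_ORDER filtered by "some chunk canonicalizes to this day"
theorem pv_A_filter (parts : List (List Char)) :
    PySem.List.sorted
      ((parts.map String.ofList).foldl
        (fun acc part => if pvCanon part ∈ pvDayOrder ∧ pvCanon part ∉ acc then acc ++ [pvCanon part] else acc) [])
      (fun d => (PySem.List.index? pvDayOrder d).getD 0)
    = pvDayOrder.filter (fun d => parts.any (fun q => d == pvCanon (String.ofList q))) := by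
  apply PySem.List.sorted_eq_of_perm_of_pairwise_lt
  · rw [List.perm_ext_iff_of_nodup
        (List.Nodup.filter _ pv_dayOrder_nodup)
        (pv_nodup_foldA pvCanon (parts.map String.ofList) [] List.nodup_nil)]
    intro d
    rw [pv_mem_foldA pvCanon (parts.map String.ofList) [] d, List.mem_filter]
    simp only [List.not_mem_nil, false_or, List.any_eq_true, List.mem_map, beq_iff_eq]
    constructor
    · rintro ⟨hd, q, hq, hc⟩; exact ⟨hd, String.ofList q, ⟨q, hq, rfl⟩, hc.symm⟩
    · rintro ⟨hd, p, ⟨q, hq, rfl⟩, hc⟩; exact ⟨hd, q, hq, hc.symm⟩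
  · exact List.Pairwise.filter _ pv_dayOrder_pairwise

-- B equals the same filter of _DAY_ORDER
theorem pv_B_filter (parts : List (List Char)) :
    ((pvDayOrder.zip (parts.foldl pvMarkDay (List.replicate 7 false))).filter
        (fun p => p.2)).map (fun p => p.1)
    = pvDayOrder.filter (fun d => parts.any (fun q => d == pvCanon (String.ofList q))) := by
  have hlen7 : (List.replicate 7 false : List Bool).length = 7 := by simp
  have hfound : parts.foldl pvMarkDay (List.replicate 7 false)
      = pvDayOrder.map (fun d => parts.any (fun q => d == pvCanon (String.ofList q))) := by
    apply List.ext_getElem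
    · rw [pv_found_length parts _ hlen7]; simp [pvDayOrder]
    · intro i hi1 hi2
      have hi : i < 7 := by rw [pv_found_length parts _ hlen7] at hi1; exact hi1
      rw [pv_found_get parts _ hlen7 i hi]
      simp only [List.getElem_replicate, List.getElem_map, Bool.false_or]
  rw [hfound, pv_zip_map_filter]

-- ===== VERDICT (by name: the statement is the Claim_ definition above) =====
theorem normalize_schedule_days_spec : Claim_equal_normalize_schedule_days := by
  intro raw _
  unfold Spec_normalize_schedule_days
  by_cases hraw : raw = ""
  · subst hraw
    decide
  · simp only [normalize_schedule_days, normalize_schedule_days_alt, if_neg hraw]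
    rw [pv_split_eq raw,
        show (PySem.Set.empty : PySem.Set String) = ([] : List String) from rfl,
        pv_foldA_diag pvCanon ((pvSplitSem [] raw.toList).map String.ofList) []]
    rw [pv_scan raw.toList (List.replicate 7 false) []]
    rw [pv_A_filter (pvSplitSem [] raw.toList), pv_B_filter (pvSplitSem [] raw.toList)]
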